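-- pv_equiv track=rewrite | github.com/pypi-data/pypi-mirror-404 | packages/pykokoro/pykokoro-0.6.4.tar.gz/pykokoro-0.6.4/examples/token_length_effects.py | version2_paired
-- ===== SOURCE A (Python) =====
-- def version2_paired(sentences: list[str]) -> list[str]:
--     """Version 2: Combine sentences in pairs."""
--     batches = []
--     for i in range(0, len(sentences), 2):
--         if i + 1 < len(sentences):
--             batches.append(f"{sentences[i]} {sentences[i + 1]}")
--         else:
--             batches.append(sentences[i])
--     return batches
-- ===== SOURCE B (Python) =====
-- def version2_paired(sentences: list[str]) -> list[str]:
--     """Version 2: Combine sentences in pairs."""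
--     evens = sentences[::2]
--     odds = sentences[1::2]
--     batches = [f"{a} {b}" for a, b in zip(evens, odds)]
--     if len(sentences) % 2 == 1:
--         batches.append(sentences[-1])
--     return batches
-- ===== Notes on version B (the rewrite author's own statement) =====
-- stated objective: idiomatic
-- what changed: Replaces the step-2 indexed loop with its in-loop boundary test by two strided slices zipped into a comprehension, plus an explicit odd-length tail append.
import Mathlib
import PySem

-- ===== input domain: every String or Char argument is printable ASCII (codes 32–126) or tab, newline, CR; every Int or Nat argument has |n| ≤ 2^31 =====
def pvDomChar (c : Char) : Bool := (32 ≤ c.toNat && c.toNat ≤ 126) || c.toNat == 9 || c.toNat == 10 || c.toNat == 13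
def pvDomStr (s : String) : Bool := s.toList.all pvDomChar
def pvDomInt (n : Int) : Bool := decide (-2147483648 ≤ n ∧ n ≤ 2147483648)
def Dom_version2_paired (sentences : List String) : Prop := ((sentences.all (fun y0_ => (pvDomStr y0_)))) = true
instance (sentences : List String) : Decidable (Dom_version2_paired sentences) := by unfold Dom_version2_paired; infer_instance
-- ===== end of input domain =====

-- B combines adjacent sentence pairs via two strided slices zipped into a comprehension (plus an
-- odd-length tail), replacing A's step-2 indexed loop with its in-loop boundary test; same cost.

-- ===== PORT A =====
def version2_paired (sentences : List String) : List String :=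
  (PySem.List.pyRange 0 (sentences.length : Int) 2).foldl
    (fun batches i =>
      if i + 1 < (sentences.length : Int) then
        batches ++ [PySem.List.pyGetD sentences i "" ++ " " ++ PySem.List.pyGetD sentences (i + 1) ""]
      else
        batches ++ [PySem.List.pyGetD sentences i ""]) []

-- ===== PORT B =====
def version2_paired_alt (sentences : List String) : List String :=
  let evens := (PySem.List.slice? sentences none none 2).getD []
  let odds := (PySem.List.slice? sentences (some 1) none 2).getD []
  let batches := (evens.zip odds).map (fun p => p.1 ++ " " ++ p.2)
  if PySem.Int.mod (sentences.length : Int) 2 = 1 then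
    batches ++ [PySem.List.pyGetD sentences (-1) ""]
  else
    batches

-- ===== PRECONDITION & SPEC =====
def Spec_version2_paired (sentences : List String) (out : List String) : Prop := out = version2_paired_alt sentences
instance (sentences : List String) (out : List String) : Decidable (Spec_version2_paired sentences out) := by unfold Spec_version2_paired; infer_instance

-- ===== CLAIM (what is proved, stated in full; the proofs are below) =====
def Claim_equal_version2_paired : Prop := ∀ (sentences : List String), Dom_version2_paired sentences → Spec_version2_paired sentences (version2_paired sentences)

-- ===== LEMMAS AND PROOFS =====

-- Common reference shape: pairing two at a time.
def pvPairs : List String → List String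
  | [] => []
  | [a] => [a]
  | a :: b :: t => (a ++ " " ++ b) :: pvPairs t

def pvEvens : List String → List String
  | [] => []
  | [a] => [a]
  | a :: _ :: t => a :: pvEvens t

lemma pvEvens_cons (x : String) (t : List String) : pvEvens (x :: t) = x :: pvEvens t.tail := by
  cases t <;> rfl

-- xs[::2] computes pvEvens xs
lemma slice2_cons_cons (a b : String) (t : List String) :
    PySem.List.slice? (a :: b :: t) none none 2 = (PySem.List.slice? t none none 2).map (a :: ·) := by
  simp only [PySem.List.slice?, PySem.List.sliceIndices]
  norm_num
  have h1 : (if (0:Int) ≤ (t.length:Int) + 1 then (((t.length:Int) + 1 + 1 + 2 - 1)/2).toNat else 0)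
      = ((t.length + 1)/2 : Nat) + 1 := by split_ifs with h <;> omega
  have h2 : (if 0 < t.length then (((t.length:Int) + 2 - 1)/2).toNat else 0)
      = ((t.length + 1)/2 : Nat) := by split_ifs with h <;> omega
  rw [h1, h2, List.range_succ_eq_map, List.filterMap_cons]
  norm_num
  apply List.filterMap_congr
  intro x _
  have hx : ((2 * ((x:Int) + 1)).toNat) = 2 * x + 2 := by omega
  have hx2 : ((2 * (x:Int)).toNat) = 2 * x := by omega
  simp [hx, hx2]

lemma slice2_evens : ∀ (xs : List String), PySem.List.slice? xs none none 2 = some (pvEvens xs)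
  | [] => by decide
  | [a] => by
      simp only [PySem.List.slice?, PySem.List.sliceIndices, pvEvens]
      norm_num
      simp
  | a :: b :: t => by
      rw [slice2_cons_cons, slice2_evens t]
      rfl

-- xs[1::2] is (tail xs)[::2]
lemma slice2_odd_eq_tail (xs : List String) :
    PySem.List.slice? xs (some 1) none 2 = PySem.List.slice? xs.tail none none 2 := by
  cases xs with
  | nil => decide
  | cons a t =>
    simp only [PySem.List.slice?, PySem.List.sliceIndices, List.tail_cons]
    norm_num
    apply List.filterMap_congr
    intro x _
    have hx : ((1 + 2 * (x:Int)).toNat) = 2 * x + 1 := by omega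
    have hx2 : ((2 * (x:Int)).toNat) = 2 * x := by omega
    simp [hx, hx2]

-- zip of the two stride views, plus odd tail, is pairing
lemma zip_pairs : ∀ (xs : List String),
    (List.zip (pvEvens xs) (pvEvens xs.tail)).map (fun p => p.1 ++ " " ++ p.2) ++
      (if xs.length % 2 = 1 then [PySem.List.pyGetD xs (-1) ""] else []) = pvPairs xs := by
  intro xs
  induction xs using pvPairs.induct with
  | case1 => simp [pvEvens, pvPairs]
  | case2 a =>
      have h : ([a] : List String) ≠ [] := by simp
      simp [pvEvens, pvPairs, PySem.List.pyGetD_neg_one [a] "" h]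
  | case3 a b t ih =>
      have he : pvEvens (a :: b :: t) = a :: pvEvens t := rfl
      rw [he, List.tail_cons, pvEvens_cons, List.zip_cons_cons, List.map_cons, List.cons_append]
      have hpar : (a :: b :: t).length % 2 = 1 ↔ t.length % 2 = 1 := by simp; omega
      by_cases hodd : t.length % 2 = 1
      · have ht : t ≠ [] := by intro h0; rw [h0] at hodd; simp at hodd
        rw [if_pos (hpar.mpr hodd)]
        rw [if_pos hodd] at ih
        have hlast : PySem.List.pyGetD (a :: b :: t) (-1) "" = PySem.List.pyGetD t (-1) "" := by
          rw [PySem.List.pyGetD_neg_one (a :: b :: t) "" (by simp),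
            PySem.List.pyGetD_neg_one t "" ht]
          simp [List.getLast_cons, ht]
        rw [hlast, ih]
        rfl
      · rw [if_neg (fun hc => hodd (hpar.mp hc))]
        rw [if_neg hodd] at ih
        rw [ih]
        rfl

lemma mod_two_cast (n : Nat) : PySem.Int.mod (n : Int) 2 = 1 ↔ n % 2 = 1 := by
  have := PySem.Int.mod_natCast n 2
  rw [show ((2:Nat):Int) = (2:Int) by norm_num] at this
  rw [this]
  exact_mod_cast Iff.rfl

-- B equals pvPairs
lemma alt_eq_pairs (xs : List String) : version2_paired_alt xs = pvPairs xs := by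
  unfold version2_paired_alt
  rw [slice2_evens, slice2_odd_eq_tail, slice2_evens]
  simp only [Option.getD_some]
  rw [← zip_pairs xs]
  by_cases h : xs.length % 2 = 1
  · rw [if_pos ((mod_two_cast xs.length).mpr h), if_pos h]
  · rw [if_neg (fun hc => h ((mod_two_cast xs.length).mp hc)), if_neg h, List.append_nil]

-- A's loop invariant
lemma pyRange_two_cons (a b : Int) (h : a < b) :
    PySem.List.pyRange a b 2 = a :: PySem.List.pyRange (a + 2) b 2 := by
  rw [PySem.List.pyRange_of_pos a b (by norm_num), PySem.List.pyRange_of_pos (a+2) b (by norm_num)]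
  rw [if_pos h]
  by_cases h2 : a + 2 < b
  · rw [if_pos h2]
    have hc : ((b - a + 2 - 1)/2).toNat = ((b - (a+2) + 2 - 1)/2).toNat + 1 := by omega
    rw [hc, List.range_succ_eq_map, List.map_cons, List.map_map]
    norm_num
    intro k _
    ring
  · rw [if_neg h2]
    have hc : ((b - a + 2 - 1)/2).toNat = 1 := by omega
    rw [hc]
    norm_num

lemma loopA (s : List String) : ∀ (n k : Nat), s.length - k ≤ n → ∀ (acc : List String),
    (PySem.List.pyRange (k : Int) (s.length : Int) 2).foldl
      (fun batches i =>
        if i + 1 < (s.length : Int) then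
          batches ++ [PySem.List.pyGetD s i "" ++ " " ++ PySem.List.pyGetD s (i + 1) ""]
        else
          batches ++ [PySem.List.pyGetD s i ""]) acc
    = acc ++ pvPairs (s.drop k) := by
  intro n
  induction n with
  | zero =>
      intro k h acc
      have hk : s.length ≤ k := by omega
      rw [PySem.List.pyRange_of_pos _ _ (by norm_num : (0:Int) < 2),
        if_neg (by exact_mod_cast not_lt.mpr hk)]
      simp [List.drop_eq_nil_of_le hk, pvPairs]
  | succ n ih =>
      intro k h acc
      by_cases hk : k < s.length
      · rw [pyRange_two_cons _ _ (by exact_mod_cast hk), List.foldl_cons]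
        rw [show ((k:Int) + 2) = ((k + 2 : Nat) : Int) by push_cast; ring]
        rw [ih (k + 2) (by omega)]
        by_cases hk1 : k + 1 < s.length
        · rw [if_pos (by exact_mod_cast hk1)]
          rw [show ((k:Int) + 1) = ((k + 1 : Nat) : Int) by push_cast; ring]
          simp only [PySem.List.pyGetD_natCast]
          rw [List.drop_eq_getElem_cons hk, List.drop_eq_getElem_cons hk1]
          have e1 : s.getD k "" = s[k] := List.getD_eq_getElem s "" hk
          have e2 : s.getD (k+1) "" = s[k+1] := List.getD_eq_getElem s "" hk1
          rw [e1, e2]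
          simp [pvPairs]
        · rw [if_neg (by exact_mod_cast hk1)]
          simp only [PySem.List.pyGetD_natCast]
          have hlen : s.length = k + 1 := by omega
          rw [List.drop_eq_getElem_cons hk]
          have hnil : s.drop (k+1) = [] := List.drop_eq_nil_of_le (by omega)
          have e1 : s.getD k "" = s[k] := List.getD_eq_getElem s "" hk
          rw [e1]
          have : s.drop (k+2) = [] := List.drop_eq_nil_of_le (by omega)
          rw [this, hnil]
          simp [pvPairs]
      · rw [PySem.List.pyRange_of_pos _ _ (by norm_num : (0:Int) < 2),
          if_neg (by exact_mod_cast hk)]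
        simp [List.drop_eq_nil_of_le (by omega : s.length ≤ k), pvPairs]

lemma a_eq_pairs (xs : List String) : version2_paired xs = pvPairs xs := by
  have h := loopA xs xs.length 0 (by omega) []
  simpa [version2_paired] using h

-- ===== VERDICT (by name: the statement is the Claim_ definition above) =====
theorem version2_paired_spec : Claim_equal_version2_paired := by
  intro s _
  unfold Spec_version2_paired
  rw [a_eq_pairs, alt_eq_pairs]
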